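-- pv_equiv track=rewrite | github.com/savad/data_structure_practice | codility/codility_reduce_time_complexity.py | solution
-- ===== SOURCE A (Python) =====
-- def solution(A):
--     N = len(A)
--     result = 0
--     for i in range(N):
--         for j in range(i, N):
--             if A[i] != A[j]:
--                 result = max(result, j - i)
--     return result
-- ===== SOURCE B (Python) =====
-- def solution(A):
--     # O(N): an optimal pair can always be anchored at the first or last element.
--     n = len(A)
--     best = 0
--     for j in range(n):
--         if A[j] != A[0]:
--             best = max(best, j)
--         if A[j] != A[n - 1]:
--             best = max(best, n - 1 - j)
--     return best
-- ===== Notes on version B (the rewrite author's own statement) =====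
-- stated objective: faster
-- what changed: Replaces the O(N^2) scan over all index pairs by a single O(N) pass that only considers pairs anchored at the first or last element (an optimal differing pair can always be so anchored).
import Mathlib
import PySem

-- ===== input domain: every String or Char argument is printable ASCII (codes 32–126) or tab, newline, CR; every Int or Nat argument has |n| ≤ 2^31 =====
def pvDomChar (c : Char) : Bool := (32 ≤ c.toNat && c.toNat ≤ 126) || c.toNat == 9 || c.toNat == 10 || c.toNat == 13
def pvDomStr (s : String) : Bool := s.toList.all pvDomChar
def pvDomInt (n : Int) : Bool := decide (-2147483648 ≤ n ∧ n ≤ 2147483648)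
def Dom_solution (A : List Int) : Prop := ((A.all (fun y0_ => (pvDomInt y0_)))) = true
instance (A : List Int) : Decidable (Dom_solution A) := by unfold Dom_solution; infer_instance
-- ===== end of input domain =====

-- B replaces A's O(N^2) scan over all index pairs by one pass over pairs anchored
-- at the first or last element; an optimal differing pair can always be so anchored.

-- ===== PORT A =====
def solution (A : List Int) : Int :=
  let N : Int := A.length
  (PySem.List.pyRange 0 N 1).foldl (fun result i =>
    (PySem.List.pyRange i N 1).foldl (fun result j =>
      if PySem.List.pyGetD A i 0 ≠ PySem.List.pyGetD A j 0 then max result (j - i)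
      else result) result) 0

-- ===== PORT B =====
def solution_alt (A : List Int) : Int :=
  let n : Int := A.length
  (PySem.List.pyRange 0 n 1).foldl (fun best j =>
    let best := if PySem.List.pyGetD A j 0 ≠ PySem.List.pyGetD A 0 0 then max best j else best
    if PySem.List.pyGetD A j 0 ≠ PySem.List.pyGetD A (n - 1) 0 then max best (n - 1 - j)
    else best) 0

-- ===== PRECONDITION & SPEC =====
def Spec_solution (A : List Int) (out : Int) : Prop := out = solution_alt A
instance (A : List Int) (out : Int) : Decidable (Spec_solution A out) := by unfold Spec_solution; infer_instance

-- ===== CLAIM (what is proved, stated in full; the proofs are below) =====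
def Claim_equal_solution : Prop := ∀ (A : List Int), Dom_solution A → Spec_solution A (solution A)

-- ===== LEMMAS AND PROOFS =====

-- The common "conditional running max" step on an index pair (i, j).
def stepP (A : List Int) (r : Int) (p : Int × Int) : Int :=
  if PySem.List.pyGetD A p.1 0 ≠ PySem.List.pyGetD A p.2 0 then max r (p.2 - p.1) else r

-- All pairs A's double loop visits.
def pairsA (A : List Int) : List (Int × Int) :=
  (PySem.List.pyRange 0 (A.length : Int) 1).flatMap
    (fun i => (PySem.List.pyRange i (A.length : Int) 1).map (fun j => (i, j)))

-- The anchored pairs B visits.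
def pairsB (A : List Int) : List (Int × Int) :=
  (PySem.List.pyRange 0 (A.length : Int) 1).flatMap
    (fun j => [((0 : Int), j), (j, (A.length : Int) - 1)])

lemma stepP_foldl_le_iff (A : List Int) :
    ∀ (l : List (Int × Int)) (r m : Int),
      l.foldl (stepP A) r ≤ m ↔
        r ≤ m ∧ ∀ p ∈ l, PySem.List.pyGetD A p.1 0 ≠ PySem.List.pyGetD A p.2 0 →
          p.2 - p.1 ≤ m := by
  intro l
  induction l with
  | nil => simp
  | cons a l ih =>
    intro r m
    simp only [List.foldl_cons, ih, List.mem_cons, forall_eq_or_imp]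
    unfold stepP
    split_ifs with h
    · constructor
      · rintro ⟨h1, h2⟩
        exact ⟨by omega, fun _ => by omega, h2⟩
      · rintro ⟨h1, h2, h3⟩
        exact ⟨max_le h1 (h2 h), h3⟩
    · constructor
      · rintro ⟨h1, h2⟩
        exact ⟨h1, fun hc => absurd hc h, h2⟩
      · rintro ⟨h1, _, h3⟩
        exact ⟨h1, h3⟩

lemma stepP_le_foldl (A : List Int) (l : List (Int × Int)) (r : Int) :
    r ≤ l.foldl (stepP A) r ∧
      ∀ p ∈ l, PySem.List.pyGetD A p.1 0 ≠ PySem.List.pyGetD A p.2 0 →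
        p.2 - p.1 ≤ l.foldl (stepP A) r :=
  (stepP_foldl_le_iff A l r _).mp le_rfl

lemma solA_eq (A : List Int) : solution A = (pairsA A).foldl (stepP A) 0 := by
  simp only [solution, pairsA, List.foldl_flatMap, List.foldl_map, stepP]

lemma solB_eq (A : List Int) : solution_alt A = (pairsB A).foldl (stepP A) 0 := by
  simp only [solution_alt, pairsB, List.foldl_flatMap, List.foldl_cons, List.foldl_nil, stepP]
  congr 1
  funext best j
  rw [sub_zero]
  by_cases h : PySem.List.pyGetD A j 0 = PySem.List.pyGetD A 0 0
  · simp [h]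
  · simp [h, Ne.symm h]

lemma mem_pairsB_left (A : List Int) (j : Int) (h0 : 0 ≤ j) (h1 : j < (A.length : Int)) :
    ((0 : Int), j) ∈ pairsB A := by
  unfold pairsB
  rw [List.mem_flatMap]
  exact ⟨j, (PySem.List.mem_pyRange_one).mpr ⟨h0, h1⟩, by simp⟩

lemma mem_pairsB_right (A : List Int) (j : Int) (h0 : 0 ≤ j) (h1 : j < (A.length : Int)) :
    (j, (A.length : Int) - 1) ∈ pairsB A := by
  unfold pairsB
  rw [List.mem_flatMap]
  exact ⟨j, (PySem.List.mem_pyRange_one).mpr ⟨h0, h1⟩, by simp⟩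

lemma mem_pairsA (A : List Int) (i j : Int) (h0 : 0 ≤ i) (h1 : i ≤ j)
    (h2 : j < (A.length : Int)) : (i, j) ∈ pairsA A := by
  unfold pairsA
  rw [List.mem_flatMap]
  refine ⟨i, (PySem.List.mem_pyRange_one).mpr ⟨h0, by omega⟩, ?_⟩
  rw [List.mem_map]
  exact ⟨j, (PySem.List.mem_pyRange_one).mpr ⟨h1, h2⟩, rfl⟩

lemma folds_eq (A : List Int) :
    (pairsA A).foldl (stepP A) 0 = (pairsB A).foldl (stepP A) 0 := by
  apply le_antisymm
  · rw [stepP_foldl_le_iff]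
    refine ⟨(stepP_le_foldl A _ 0).1, ?_⟩
    intro p hp hc
    unfold pairsA at hp
    rw [List.mem_flatMap] at hp
    obtain ⟨i, hi, hmem⟩ := hp
    rw [List.mem_map] at hmem
    obtain ⟨j, hj, rfl⟩ := hmem
    rw [PySem.List.mem_pyRange_one] at hi hj
    simp only at hc ⊢
    by_cases h1 : PySem.List.pyGetD A 0 0 ≠ PySem.List.pyGetD A j 0
    · have := (stepP_le_foldl A (pairsB A) 0).2 (0, j)
        (mem_pairsB_left A j (by omega) (by omega)) h1
      simp only at this; omega
    · push Not at h1
      have h2 : PySem.List.pyGetD A i 0 ≠ PySem.List.pyGetD A 0 0 := by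
        rw [h1]; exact hc
      by_cases h3 : PySem.List.pyGetD A i 0 ≠ PySem.List.pyGetD A ((A.length : Int) - 1) 0
      · have := (stepP_le_foldl A (pairsB A) 0).2 (i, (A.length : Int) - 1)
          (mem_pairsB_right A i (by omega) (by omega)) h3
        simp only at this; omega
      · push Not at h3
        have h4 : PySem.List.pyGetD A 0 0 ≠ PySem.List.pyGetD A ((A.length : Int) - 1) 0 := by
          rw [← h3]; exact h2.symm
        have := (stepP_le_foldl A (pairsB A) 0).2 (0, (A.length : Int) - 1)
          (mem_pairsB_left A ((A.length : Int) - 1) (by omega) (by omega)) h4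
        simp only at this; omega
  · rw [stepP_foldl_le_iff]
    refine ⟨(stepP_le_foldl A _ 0).1, ?_⟩
    intro p hp hc
    unfold pairsB at hp
    rw [List.mem_flatMap] at hp
    obtain ⟨j, hj, hmem⟩ := hp
    rw [PySem.List.mem_pyRange_one] at hj
    simp only [List.mem_cons, List.not_mem_nil, or_false] at hmem
    rcases hmem with rfl | rfl
    · have := (stepP_le_foldl A (pairsA A) 0).2 (0, j)
        (mem_pairsA A 0 j le_rfl hj.1 hj.2) hc
      simpa using this
    · have := (stepP_le_foldl A (pairsA A) 0).2 (j, (A.length : Int) - 1)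
        (mem_pairsA A j _ hj.1 (by omega) (by omega)) hc
      simpa using this

-- ===== VERDICT (by name: the statement is the Claim_ definition above) =====
theorem solution_spec : Claim_equal_solution := by
  intro A _
  unfold Spec_solution
  rw [solA_eq, solB_eq, folds_eq]
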